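-- pv_equiv track=rewrite | github.com/zzxwill/browser-use | browser_use/browser/utils.py | normalize_url
-- ===== SOURCE A (Python) =====
-- def normalize_url(url: str) -> str:
-- 	"""
-- 	Normalize a URL by adding https:// protocol if needed, while preserving special URLs.
--
-- 	This function safely adds https:// to URLs that lack a protocol, but preserves
-- 	special URLs like "about:blank", "chrome://new-tab-page", "mailto:...", "tel:...", etc.
-- 	that should not be prefixed with https://.
--
-- 	Args:
-- 	    url: The URL string to normalize
--
-- 	Returns:
-- 	    str: The normalized URL with protocol if needed
--
-- 	Examples:
-- 	    >>> normalize_url('example.com')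
-- 	    'https://example.com'
-- 	    >>> normalize_url('about:blank')
-- 	    'about:blank'
-- 	    >>> normalize_url('mailto:test@example.com')
-- 	    'mailto:test@example.com'
-- 	    >>> normalize_url('https://example.com')
-- 	    'https://example.com'
-- 	"""
-- 	normalized_url = url.strip()
--
-- 	# If URL already has a protocol, return as-is
-- 	if '://' in normalized_url:
-- 		return normalized_url
--
-- 	# Check for special protocols that should not be prefixed with https://
-- 	special_protocols = ['about:', 'mailto:', 'tel:', 'ftp:', 'file:', 'data:', 'javascript:']
-- 	for protocol in special_protocols:
-- 		if normalized_url.startswith(protocol):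
-- 			return normalized_url
--
-- 	# For everything else, add https://
-- 	return f'https://{normalized_url}'
-- ===== SOURCE B (Python) =====
-- _SPECIAL_SCHEMES = {'about', 'mailto', 'tel', 'ftp', 'file', 'data', 'javascript'}
--
--
-- def normalize_url(url: str) -> str:
-- 	u = url.strip()
-- 	if '://' in u:
-- 		return u
-- 	i = u.find(':')
-- 	if i != -1 and u[:i] in _SPECIAL_SCHEMES:
-- 		return u
-- 	return f'https://{u}'
-- ===== Notes on version B (the rewrite author's own statement) =====
-- stated objective: idiomatic
-- what changed: Replaces the loop over seven special-protocol prefix checks with a single extraction of the text before the first colon and one membership test in a set of scheme names.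
import Mathlib
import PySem

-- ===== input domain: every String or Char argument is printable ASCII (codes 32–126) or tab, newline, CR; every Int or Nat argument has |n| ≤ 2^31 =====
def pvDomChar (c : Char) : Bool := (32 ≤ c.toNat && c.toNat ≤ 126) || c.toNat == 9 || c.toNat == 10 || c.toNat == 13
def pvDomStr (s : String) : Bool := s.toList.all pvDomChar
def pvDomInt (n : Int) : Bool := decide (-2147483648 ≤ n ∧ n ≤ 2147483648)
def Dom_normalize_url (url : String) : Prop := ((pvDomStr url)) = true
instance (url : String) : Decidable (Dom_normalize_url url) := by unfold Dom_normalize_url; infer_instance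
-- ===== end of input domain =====

-- B replaces A's loop over seven special-protocol prefixes by extracting the text before the
-- first colon and testing it once against a set of scheme names (idiomatic; same cost).


-- ===== PORT A =====
-- the 'for protocol in special_protocols: if normalized_url.startswith(protocol): return …' loop
def pvLoopA (u : String) : List String → String
  | [] => "https://" ++ u
  | p :: ps => if PySem.Str.startswith u p then u else pvLoopA u ps

def normalize_url (url : String) : String :=
  let normalized_url := PySem.Str.strip url
  if PySem.Str.isIn "://" normalized_url then normalized_url
  else pvLoopA normalized_url ["about:", "mailto:", "tel:", "ftp:", "file:", "data:", "javascript:"]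

-- ===== PORT B =====
def pvSpecialSchemes : PySem.Set String :=
  PySem.Set.ofList ["about", "mailto", "tel", "ftp", "file", "data", "javascript"]

def normalize_url_alt (url : String) : String :=
  let u := PySem.Str.strip url
  if PySem.Str.isIn "://" u then u
  else
    let i := PySem.Str.find u ":"
    if i ≠ -1 ∧ PySem.Set.contains pvSpecialSchemes (PySem.Str.slice u none (some i)) = true then u
    else "https://" ++ u

-- ===== PRECONDITION & SPEC =====
def Spec_normalize_url (url : String) (out : String) : Prop := out = normalize_url_alt url
instance (url : String) (out : String) : Decidable (Spec_normalize_url url out) := by unfold Spec_normalize_url; infer_instance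

-- ===== CLAIM (what is proved, stated in full; the proofs are below) =====
def Claim_equal_normalize_url : Prop := ∀ (url : String), Dom_normalize_url url → Spec_normalize_url url (normalize_url url)

-- ===== LEMMAS AND PROOFS =====

-- For a prefix p without ':', u starts with p ++ ':' iff the first ':' of u sits right
-- after a copy of p, i.e. find = p.length and take = p.
theorem pvKeyChars (cs p : List Char) (hp : ':' ∉ p) :
    PySem.Chars.startswith cs (p ++ [':']) = true ↔
      (0 ≤ PySem.Chars.find cs [':'] ∧ cs.take (PySem.Chars.find cs [':']).toNat = p) := by
  constructor
  · intro h
    rw [PySem.Chars.startswith_iff] at h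
    have hinf : [':'] <:+: cs := by
      rcases h with ⟨t, ht⟩
      exact ⟨p, t, by simpa using ht⟩
    have h0 : 0 ≤ PySem.Chars.find cs [':'] := (PySem.Chars.find_nonneg_iff cs [':']).mpr hinf
    obtain ⟨hpre, hmin⟩ := PySem.Chars.find_spec h0
    rcases h with ⟨t, ht⟩
    set i := (PySem.Chars.find cs [':']).toNat with hi
    have hdropP : [':'] <+: cs.drop p.length := by
      rw [← ht]; simp
    have hle : i ≤ p.length := by
      by_contra hgt
      exact (hmin p.length (by omega)) hdropP
    have hge : p.length ≤ i := by
      by_contra hlt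
      push Not at hlt
      have : cs.drop i = p.drop i ++ [':'] ++ t := by
        rw [← ht]; simp [List.drop_append_of_le_length, le_of_lt hlt]
      rcases hpre with ⟨r, hr⟩
      rw [this] at hr
      have hne : p.drop i ≠ [] := by simp [hlt]
      rcases List.exists_cons_of_ne_nil hne with ⟨c, cs', hc⟩
      rw [hc] at hr
      simp at hr
      have : c ∈ p := by
        have : c ∈ p.drop i := by rw [hc]; exact List.mem_cons_self
        exact List.mem_of_mem_drop this
      exact hp (hr.1 ▸ this)
    have hieq : i = p.length := le_antisymm hle hge
    refine ⟨h0, ?_⟩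
    rw [hieq, ← ht]; simp
  · rintro ⟨h0, htake⟩
    obtain ⟨hpre, -⟩ := PySem.Chars.find_spec h0
    rw [PySem.Chars.startswith_iff]
    rcases hpre with ⟨t, ht⟩
    refine ⟨t, ?_⟩
    calc p ++ [':'] ++ t
        = cs.take (PySem.Chars.find cs [':']).toNat ++ ([':'] ++ t) := by rw [htake]; simp
      _ = cs := by rw [ht]; simp

-- the same statement lifted to the String wrappers used by the ports
theorem pvKeyStr (u S SC : String) (hSC : SC.toList = S.toList ++ [':'])
    (hp : ':' ∉ S.toList) :
    PySem.Str.startswith u SC = true ↔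
      (PySem.Str.find u ":" ≠ -1 ∧
        PySem.Str.slice u none (some (PySem.Str.find u ":")) = S) := by
  have hfind : PySem.Str.find u ":" = PySem.Chars.find u.toList [':'] :=
    PySem.Str.find_eq u ":"
  have hkey := pvKeyChars u.toList S.toList hp
  have hge : -1 ≤ PySem.Chars.find u.toList [':'] := PySem.Chars.neg_one_le_find _ _
  constructor
  · intro h
    have h' := hkey.mp (by rw [PySem.Str.startswith_eq, hSC] at h; exact h)
    refine ⟨by rw [hfind]; omega, ?_⟩
    apply String.toList_inj.mp
    rw [PySem.Str.toList_slice, PySem.Chars.slice_eq_listSlice, hfind,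
      PySem.List.slice_to u.toList h'.1]
    exact h'.2
  · rintro ⟨hne, hsl⟩
    have h0 : 0 ≤ PySem.Chars.find u.toList [':'] := by rw [hfind] at hne; omega
    rw [PySem.Str.startswith_eq, hSC]
    apply hkey.mpr
    refine ⟨h0, ?_⟩
    have := congrArg String.toList hsl
    rw [PySem.Str.toList_slice, PySem.Chars.slice_eq_listSlice, hfind,
      PySem.List.slice_to u.toList h0] at this
    exact this

-- if some p in the list matches, the loop returns u
theorem pvLoopA_of_true (u p : String) (l : List String) (hmem : p ∈ l)
    (h : PySem.Str.startswith u p = true) : pvLoopA u l = u := by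
  induction l with
  | nil => cases hmem
  | cons a t ih =>
    rw [pvLoopA]
    by_cases ha : PySem.Str.startswith u a = true
    · rw [if_pos ha]
    · rcases List.mem_cons.mp hmem with rfl | hmt
      · exact absurd h ha
      · rw [if_neg ha]
        exact ih hmt

-- A's prefix loop computes exactly B's scheme test
theorem pvLoop_eq (u : String) :
    pvLoopA u ["about:", "mailto:", "tel:", "ftp:", "file:", "data:", "javascript:"] =
      if PySem.Str.find u ":" ≠ -1 ∧
          PySem.Set.contains pvSpecialSchemes
            (PySem.Str.slice u none (some (PySem.Str.find u ":"))) = true then u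
      else "https://" ++ u := by
  have k1 := pvKeyStr u "about" "about:" rfl (by decide)
  have k2 := pvKeyStr u "mailto" "mailto:" rfl (by decide)
  have k3 := pvKeyStr u "tel" "tel:" rfl (by decide)
  have k4 := pvKeyStr u "ftp" "ftp:" rfl (by decide)
  have k5 := pvKeyStr u "file" "file:" rfl (by decide)
  have k6 := pvKeyStr u "data" "data:" rfl (by decide)
  have k7 := pvKeyStr u "javascript" "javascript:" rfl (by decide)
  by_cases hB : PySem.Str.find u ":" ≠ -1 ∧
      PySem.Set.contains pvSpecialSchemes
        (PySem.Str.slice u none (some (PySem.Str.find u ":"))) = true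
  · rw [if_pos hB]
    obtain ⟨hne, hmem⟩ := hB
    have hmem' : PySem.Str.slice u none (some (PySem.Str.find u ":")) ∈
        (["about", "mailto", "tel", "ftp", "file", "data", "javascript"] : List String) := by
      rw [pvSpecialSchemes, PySem.Set.contains_iff, PySem.Set.mem_ofList] at hmem
      exact hmem
    simp only [List.mem_cons, List.not_mem_nil, or_false] at hmem'
    rcases hmem' with h | h | h | h | h | h | h
    · exact pvLoopA_of_true u "about:" _ (by decide) (k1.mpr ⟨hne, h⟩)
    · exact pvLoopA_of_true u "mailto:" _ (by decide) (k2.mpr ⟨hne, h⟩)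
    · exact pvLoopA_of_true u "tel:" _ (by decide) (k3.mpr ⟨hne, h⟩)
    · exact pvLoopA_of_true u "ftp:" _ (by decide) (k4.mpr ⟨hne, h⟩)
    · exact pvLoopA_of_true u "file:" _ (by decide) (k5.mpr ⟨hne, h⟩)
    · exact pvLoopA_of_true u "data:" _ (by decide) (k6.mpr ⟨hne, h⟩)
    · exact pvLoopA_of_true u "javascript:" _ (by decide) (k7.mpr ⟨hne, h⟩)
  · rw [if_neg hB]
    have noMatch : ∀ S SC : String,
        (PySem.Str.startswith u SC = true ↔
          (PySem.Str.find u ":" ≠ -1 ∧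
            PySem.Str.slice u none (some (PySem.Str.find u ":")) = S)) →
        S ∈ (["about", "mailto", "tel", "ftp", "file", "data", "javascript"] : List String) →
        PySem.Str.startswith u SC = false := by
      intro S SC hk hS
      by_contra hne
      have h := hk.mp (by revert hne; cases PySem.Str.startswith u SC <;> simp)
      exact hB ⟨h.1, by
        rw [pvSpecialSchemes, PySem.Set.contains_iff, PySem.Set.mem_ofList, h.2]
        exact hS⟩
    have c1 := noMatch _ _ k1 (by decide)
    have c2 := noMatch _ _ k2 (by decide)
    have c3 := noMatch _ _ k3 (by decide)
    have c4 := noMatch _ _ k4 (by decide)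
    have c5 := noMatch _ _ k5 (by decide)
    have c6 := noMatch _ _ k6 (by decide)
    have c7 := noMatch _ _ k7 (by decide)
    simp only [pvLoopA]
    rw [c1, c2, c3, c4, c5, c6, c7]
    simp

-- ===== VERDICT (by name: the statement is the Claim_ definition above) =====
theorem normalize_url_spec : Claim_equal_normalize_url := by
  intro url _
  unfold Spec_normalize_url normalize_url normalize_url_alt
  by_cases h : PySem.Str.isIn "://" (PySem.Str.strip url) = true
  · simp only [h, if_true]
  · simp only [h]
    simp only [Bool.false_eq_true, if_false]
    exact pvLoop_eq (PySem.Str.strip url)
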